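-- pv_equiv track=rewrite | github.com/spassignat/james | parsers/parsers/lang/javascript_analyzer.py | _calculate_max_nesting_depth
-- ===== SOURCE A (Python) =====
-- def _calculate_max_nesting_depth(content: str) -> int:
--     """Calcule la profondeur maximale d'imbrication"""
--     max_depth = 0
--     current_depth = 0
--
--     for char in content:
--         if char in '{[(':
--             current_depth += 1
--             max_depth = max(max_depth, current_depth)
--         elif char in '}])':
--             current_depth -= 1
--
--     return max_depth
-- ===== SOURCE B (Python) =====
-- def _calculate_max_nesting_depth(content: str) -> int:
--     """Right-to-left pass: depth_from_here is the max nesting depth of the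
--     remaining suffix when entered at depth 0, clamped at 0 each step."""
--     depth_from_here = 0
--     for char in reversed(content):
--         if char in '{[(':
--             delta = 1
--         elif char in '}])':
--             delta = -1
--         else:
--             delta = 0
--         depth_from_here = max(0, delta + depth_from_here)
--     return depth_from_here
-- ===== Notes on version B (the rewrite author's own statement) =====
-- stated objective: alternative
-- what changed: Replaces A's forward loop with two state variables (current depth plus running max) by a backward traversal maintaining a single clamped suffix value: the max depth reachable in the remaining suffix entered at depth 0, updated as max(0, delta + acc).
import Mathlib
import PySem

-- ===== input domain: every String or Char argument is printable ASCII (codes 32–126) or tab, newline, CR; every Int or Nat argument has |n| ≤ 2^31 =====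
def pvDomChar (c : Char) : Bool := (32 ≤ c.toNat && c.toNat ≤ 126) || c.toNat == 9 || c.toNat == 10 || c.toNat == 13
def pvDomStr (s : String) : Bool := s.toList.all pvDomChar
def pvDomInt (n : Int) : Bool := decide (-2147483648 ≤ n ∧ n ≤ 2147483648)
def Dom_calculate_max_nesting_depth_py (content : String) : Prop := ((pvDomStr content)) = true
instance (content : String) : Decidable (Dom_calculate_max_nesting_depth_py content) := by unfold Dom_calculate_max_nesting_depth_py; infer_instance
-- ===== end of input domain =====

-- B replaces A's forward two-register loop by a backward pass keeping one clamped suffix value; objective: alternative decomposition (same cost).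

-- ===== PORT A =====
-- A's loop: state (max_depth, current_depth), one step per character, branches in source order.
def calculate_max_nesting_depth_py (content : String) : Int :=
  (content.toList.foldl
    (fun (st : Int × Int) (char : Char) =>
      if char ∈ ['{', '[', '('] then
        (max st.1 (st.2 + 1), st.2 + 1)
      else if char ∈ ['}', ']', ')'] then
        (st.1, st.2 - 1)
      else st)
    (0, 0)).1

-- ===== PORT B =====
-- per-character delta computed by Source B's if/elif/else
def pvDelta (c : Char) : Int :=
  if c ∈ ['{', '[', '('] then 1 else if c ∈ ['}', ']', ')'] then -1 else 0

-- Source B: for char in reversed(content): depth_from_here = max(0, delta + depth_from_here)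
def calculate_max_nesting_depth_py_alt (content : String) : Int :=
  content.toList.reverse.foldl (fun acc char => max 0 (pvDelta char + acc)) 0

-- ===== PRECONDITION & SPEC =====
def Spec_calculate_max_nesting_depth_py (content : String) (out : Int) : Prop := out = calculate_max_nesting_depth_py_alt content
instance (content : String) (out : Int) : Decidable (Spec_calculate_max_nesting_depth_py content out) := by unfold Spec_calculate_max_nesting_depth_py; infer_instance

-- ===== CLAIM =====
def Claim_equal_calculate_max_nesting_depth_py : Prop := ∀ (content : String), Dom_calculate_max_nesting_depth_py content → Spec_calculate_max_nesting_depth_py content (calculate_max_nesting_depth_py content)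

-- ===== LEMMAS AND PROOFS =====

-- B's backward fold, written as the front-first recursion it is equivalent to
def pvMaxPref : List Char → Int
  | [] => 0
  | c :: cs => max 0 (pvDelta c + pvMaxPref cs)

theorem pvMaxPref_nonneg : ∀ cs : List Char, 0 ≤ pvMaxPref cs
  | [] => le_refl 0
  | _ :: cs => by simp [pvMaxPref]

theorem alt_eq_maxPref (content : String) :
    calculate_max_nesting_depth_py_alt content = pvMaxPref content.toList := by
  unfold calculate_max_nesting_depth_py_alt
  rw [List.foldl_reverse]
  induction content.toList with
  | nil => rfl
  | cons c cs ih => simp [List.foldr, pvMaxPref, ih]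

theorem a_loop_spec : ∀ (l : List Char) (m c : Int), c ≤ m →
    (List.foldl
      (fun (st : Int × Int) (char : Char) =>
        if char ∈ ['{', '[', '('] then
          (max st.1 (st.2 + 1), st.2 + 1)
        else if char ∈ ['}', ']', ')'] then
          (st.1, st.2 - 1)
        else st)
      (m, c) l).1 = max m (c + pvMaxPref l)
  | [], m, c, h => by simp [pvMaxPref]; omega
  | ch :: t, m, c, h => by
    have hF := pvMaxPref_nonneg t
    by_cases h1 : ch ∈ ['{', '[', '(']
    · have ih := a_loop_spec t (max m (c + 1)) (c + 1) (le_max_right _ _)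
      simp only [List.foldl, if_pos h1, ih, pvMaxPref, pvDelta]
      omega
    · by_cases h2 : ch ∈ ['}', ']', ')']
      · have ih := a_loop_spec t m (c - 1) (by omega)
        simp only [List.foldl, if_neg h1, if_pos h2, ih, pvMaxPref, pvDelta]
        omega
      · have ih := a_loop_spec t m c h
        simp only [List.foldl, if_neg h1, if_neg h2, ih, pvMaxPref, pvDelta]
        omega

-- ===== VERDICT =====
theorem calculate_max_nesting_depth_py_spec : Claim_equal_calculate_max_nesting_depth_py := by
  intro content _
  unfold Spec_calculate_max_nesting_depth_py
  rw [alt_eq_maxPref]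
  unfold calculate_max_nesting_depth_py
  rw [a_loop_spec content.toList 0 0 (le_refl 0)]
  have h := pvMaxPref_nonneg content.toList
  omega
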